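-- pv_equiv track=rewrite | github.com/jayson-tung/test-1-corrections | testcorrections.py | count_proteins
-- ===== SOURCE A (Python) =====
-- def count_proteins(strlist):
--     tempdict = {}
--     for word in strlist:
--         if word[:-2] in tempdict:
--             tempdict[word[:-2]] += 1
--         if word[:-2] not in tempdict:
--             tempdict[word[:-2]] = 1
--     return tempdict
-- ===== SOURCE B (Python) =====
-- def count_proteins(strlist):
--     # Sort the prefixes, count each run of equal prefixes in one scan,
--     # then emit the counts keyed in first-appearance order.
--     prefixes = [w[:-2] for w in strlist]
--     sp = sorted(prefixes)
--     counts = {}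
--     i = 0
--     n = len(sp)
--     while i < n:
--         j = i + 1
--         while j < n and sp[j] == sp[i]:
--             j += 1
--         counts[sp[i]] = j - i
--         i = j
--     return {p: counts[p] for p in dict.fromkeys(prefixes)}
-- ===== Notes on version B (the rewrite author's own statement) =====
-- stated objective: alternative
-- what changed: Replaces the running-count hash-map loop with sort-then-scan: the prefix list is sorted, each run of equal prefixes is counted in one linear scan, and the counts are emitted keyed in first-appearance order via dict.fromkeys.
import Mathlib
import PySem

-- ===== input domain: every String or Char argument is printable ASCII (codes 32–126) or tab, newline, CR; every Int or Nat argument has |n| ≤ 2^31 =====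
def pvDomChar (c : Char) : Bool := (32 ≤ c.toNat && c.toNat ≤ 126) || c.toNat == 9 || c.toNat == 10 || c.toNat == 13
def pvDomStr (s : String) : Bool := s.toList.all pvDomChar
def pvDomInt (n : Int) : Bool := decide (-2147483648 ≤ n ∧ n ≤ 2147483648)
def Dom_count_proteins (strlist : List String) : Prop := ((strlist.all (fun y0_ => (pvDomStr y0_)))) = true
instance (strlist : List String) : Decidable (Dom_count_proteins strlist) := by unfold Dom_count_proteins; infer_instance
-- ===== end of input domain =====

-- B replaces A's running-count dict loop by sort-then-scan run counting, reordered to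
-- first appearance; equality of the returned association lists is proved for all inputs.

-- ===== PORT A =====
def count_proteins (strlist : List String) : List (String × Int) :=
  (strlist.foldl (fun tempdict word =>
      let k := PySem.Str.slice word none (some (-2))        -- word[:-2]
      let d1 := if PySem.Dict.contains tempdict k
                then PySem.Dict.insert tempdict k (PySem.Dict.getD tempdict k 0 + 1)
                else tempdict
      if PySem.Dict.contains d1 k then d1 else PySem.Dict.insert d1 k 1)
    PySem.Dict.empty).items

-- ===== PORT B =====
-- Source B's while loop over the sorted list: scan the run of copies of the first
-- element (the inner 'while sp[j] == sp[i]' scan = takeWhile/dropWhile), record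
-- its length, continue after the run.
def runCounts : List String → PySem.Dict String Int → PySem.Dict String Int
  | [], counts => counts
  | x :: rest, counts =>
      runCounts (rest.dropWhile (· == x))
        (PySem.Dict.insert counts x (1 + ((rest.takeWhile (· == x)).length : Int)))
termination_by l _ => l.length
decreasing_by
  simp only [List.length_cons]
  exact Nat.lt_succ_of_le (List.length_dropWhile_le _ _)

def count_proteins_alt (strlist : List String) : List (String × Int) :=
  (PySem.List.dedup (strlist.map (fun w => PySem.Str.slice w none (some (-2))))).map
    (fun p => (p, PySem.Dict.getD
      (runCounts
        (PySem.List.sorted (strlist.map (fun w => PySem.Str.slice w none (some (-2))))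
          (fun x => x) false)
        PySem.Dict.empty) p 0))

-- ===== PRECONDITION & SPEC =====
def Spec_count_proteins (strlist : List String) (out : List (String × Int)) : Prop := out = count_proteins_alt strlist
instance (strlist : List String) (out : List (String × Int)) : Decidable (Spec_count_proteins strlist out) := by unfold Spec_count_proteins; infer_instance

-- ===== CLAIM (what is proved, stated in full; the proofs are below) =====
def Claim_equal_count_proteins : Prop := ∀ (strlist : List String), Dom_count_proteins strlist → Spec_count_proteins strlist (count_proteins strlist)

-- ===== LEMMAS AND PROOFS =====

-- A's loop body is extensionally the Counter step
theorem stepA_eq (d : PySem.Dict String Int) (k : String) :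
    (let d1 := if PySem.Dict.contains d k
               then PySem.Dict.insert d k (PySem.Dict.getD d k 0 + 1)
               else d
     if PySem.Dict.contains d1 k then d1 else PySem.Dict.insert d1 k 1)
    = PySem.Dict.insert d k (PySem.Dict.getD d k 0 + 1) := by
  by_cases h : PySem.Dict.contains d k
  · simp [h, PySem.Dict.contains_insert_self]
  · have h' : PySem.Dict.contains d k = false := by simpa using h
    simp [h', PySem.Dict.getD_of_not_contains d 0 h']

-- on a sorted tail all ≥ x, the leading run of x's is all of them,
-- and everything after the run is strictly greater
theorem run_facts (x : String) (rest : List String)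
    (hp : rest.Pairwise (· ≤ ·)) (hge : ∀ y ∈ rest, x ≤ y) :
    (rest.takeWhile (· == x)).length = List.count x rest ∧
    (∀ y ∈ rest.dropWhile (· == x), x < y) := by
  induction rest with
  | nil => simp
  | cons y ys ih =>
    rcases List.pairwise_cons.1 hp with ⟨hy2, hys⟩
    have hxy : x ≤ y := hge y (by simp)
    by_cases h : y = x
    · subst h
      have hge' : ∀ z ∈ ys, y ≤ z := hy2
      obtain ⟨h1, h2⟩ := ih hys hge'
      refine ⟨?_, ?_⟩
      · simp [h1]
      · simpa [List.dropWhile_cons] using h2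
    · have hlt : x < y := lt_of_le_of_ne hxy (fun e => h e.symm)
      have hnot : x ∉ y :: ys := by
        intro hm
        rcases List.mem_cons.1 hm with rfl | hm
        · exact h rfl
        · exact absurd (lt_of_lt_of_le hlt (hy2 x hm)) (lt_irrefl x)
      refine ⟨?_, ?_⟩
      · rw [List.count_eq_zero.2 hnot]
        simp [h]
      · intro z hz
        rw [List.dropWhile_cons_of_neg (by simp [h])] at hz
        rcases List.mem_cons.1 hz with rfl | hm
        · exact hlt
        · exact lt_of_lt_of_le hlt (hy2 z hm)

-- the run-counting scan over a sorted list yields the total counts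
theorem runCounts_getD (l : List String) (d : PySem.Dict String Int) (p : String)
    (hp : l.Pairwise (· ≤ ·)) :
    (runCounts l d).getD p 0
      = if p ∈ l then (List.count p l : Int) else PySem.Dict.getD d p 0 := by
  induction hn : l.length using Nat.strong_induction_on generalizing l d with
  | _ n ihn =>
    match l with
    | [] => simp [runCounts]
    | x :: rest =>
      rcases List.pairwise_cons.1 hp with ⟨hge, hrest⟩
      obtain ⟨hrun, hgt⟩ := run_facts x rest hrest hge
      have hps : (rest.dropWhile (· == x)).Pairwise (· ≤ ·) :=
        List.Pairwise.sublist (List.dropWhile_sublist _) hrest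
      have hlen : (rest.dropWhile (· == x)).length < n := by
        subst hn
        simp only [List.length_cons]
        exact Nat.lt_succ_of_le (List.length_dropWhile_le _ _)
      rw [runCounts, ihn _ hlen _ _ hps rfl]
      by_cases hpx : p = x
      · subst hpx
        have hnd : p ∉ rest.dropWhile (· == p) := fun hm => absurd (hgt p hm) (lt_irrefl p)
        simp only [hnd, if_neg, not_false_eq_true, List.mem_cons, true_or, if_true,
          PySem.Dict.getD_insert_self, List.count_cons_self, ← hrun]
        push_cast
        ring
      · have hsplit : rest = rest.takeWhile (· == x) ++ rest.dropWhile (· == x) :=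
          (List.takeWhile_append_dropWhile).symm
        have hnt : p ∉ rest.takeWhile (· == x) := fun hm =>
          hpx (by simpa using List.mem_takeWhile_imp hm)
        have hmem : (p ∈ x :: rest) ↔ p ∈ rest.dropWhile (· == x) := by
          rw [List.mem_cons, hsplit, List.mem_append]
          simp [hpx, hnt]
        have hcnt : List.count p rest = List.count p (rest.dropWhile (· == x)) := by
          conv_lhs => rw [hsplit]
          rw [List.count_append, List.count_eq_zero.2 hnt]
          omega
        by_cases hmm : p ∈ rest.dropWhile (· == x)
        · rw [if_pos hmm, if_pos (hmem.2 hmm), ← hcnt]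
          have hxp : ¬ x = p := fun h => hpx h.symm
          simp [hxp]
        · rw [if_neg hmm, if_neg (fun h => hmm (hmem.1 h))]
          simp [PySem.Dict.getD_insert, hpx]

theorem count_proteins_spec : Claim_equal_count_proteins := by
  intro strlist _
  unfold Spec_count_proteins count_proteins count_proteins_alt
  have hstep : (fun (tempdict : PySem.Dict String Int) (word : String) =>
      let k := PySem.Str.slice word none (some (-2))
      let d1 := if PySem.Dict.contains tempdict k
                then PySem.Dict.insert tempdict k (PySem.Dict.getD tempdict k 0 + 1)
                else tempdict
      if PySem.Dict.contains d1 k then d1 else PySem.Dict.insert d1 k 1)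
      = (fun (x : PySem.Dict String Int) (y : String) =>
          x.insert (PySem.Str.slice y none (some (-2)))
            (x.getD (PySem.Str.slice y none (some (-2))) 0 + 1)) := by
    funext d w
    exact stepA_eq d (PySem.Str.slice w none (some (-2)))
  rw [hstep, ← List.foldl_map (f := fun w => PySem.Str.slice w none (some (-2)))
      (g := fun (x : PySem.Dict String Int) k => x.insert k (x.getD k 0 + 1)),
    PySem.Dict.foldl_insert_getD_add_one_eq_counter, PySem.Dict.items_counter,
    PySem.List.dedup_eq_ofList]
  apply List.map_congr_left
  intro k hk
  have hkps : k ∈ strlist.map (fun w => PySem.Str.slice w none (some (-2))) :=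
    (PySem.Set.mem_ofList _ _).1 hk
  have hsp := PySem.List.sorted_pairwise
    (xs := strlist.map (fun w => PySem.Str.slice w none (some (-2)))) (key := fun x => x)
  have hksp : k ∈ PySem.List.sorted
      (strlist.map (fun w => PySem.Str.slice w none (some (-2)))) (fun x => x) false :=
    (PySem.List.mem_sorted _ _ _ _).2 hkps
  rw [runCounts_getD _ _ _ hsp, if_pos hksp,
    (PySem.List.sorted_perm _ _ _).count_eq k]
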